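-- pv_equiv track=rewrite | github.com/xyb1996/leetcode- | 数学运算相关/大数相乘.py | solvecarry
-- ===== SOURCE A (Python) =====
-- def solvecarry(nums):
-- 	# 这个函数的功能是：将输入的数组中的每一位处理好进位
-- 	# 举例：输入[15, 27, 12], 返回[5, 8, 4, 1]
-- 	for idx,num in enumerate(nums):
-- 		if  num>9:
-- 			if idx < len(nums) -1:
-- 				nums[idx+1] = nums[idx] //10+nums[idx+1]
-- 			elif idx ==len(nums)-1:
-- 				nums.append(nums[idx] //10)
-- 			nums[idx] %= 10
-- 	return nums
-- ===== SOURCE B (Python) =====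
-- def solvecarry(nums):
--     carry = 0
--     for i in range(len(nums)):
--         nums[i] += carry
--         if nums[i] > 9:
--             carry = nums[i] // 10
--             nums[i] %= 10
--         else:
--             carry = 0
--     while carry > 0:
--         nums.append(carry % 10)
--         carry //= 10
--     return nums
-- ===== Notes on version B (the rewrite author's own statement) =====
-- stated objective: simpler
-- what changed: B keeps the carry in an explicit integer variable and drains it digit by digit after the main pass, instead of A's writing the carry into nums[idx+1] / appending it and letting the for-loop re-scan the appended multi-digit elements.
import Mathlib
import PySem

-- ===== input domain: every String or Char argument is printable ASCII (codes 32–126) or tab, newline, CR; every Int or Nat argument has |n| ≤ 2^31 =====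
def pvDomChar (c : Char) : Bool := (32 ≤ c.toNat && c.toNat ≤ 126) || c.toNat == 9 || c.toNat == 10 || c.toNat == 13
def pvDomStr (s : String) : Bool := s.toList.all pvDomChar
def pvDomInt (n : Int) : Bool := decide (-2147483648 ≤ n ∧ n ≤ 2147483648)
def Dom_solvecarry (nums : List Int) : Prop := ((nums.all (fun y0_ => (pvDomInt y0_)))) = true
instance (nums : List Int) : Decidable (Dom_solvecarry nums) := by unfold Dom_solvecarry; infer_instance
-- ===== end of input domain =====

-- B keeps the carry in an explicit integer variable drained after the pass, instead of A's
-- writing carries into nums[idx+1] / appending them and re-scanning appended elements (objective: simpler).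
-- Both Pythons mutate nums in place; the equivalence proved here is about the return value.

-- ===== PORT A =====
-- A's for-loop over enumerate(nums): the prefix already processed is kept reversed in acc,
-- the still-to-scan suffix (into whose head A has already added any carry, and to which A's
-- append adds elements) is the second argument.  Appended elements are re-scanned, as in Python.
def solvecarryLoopA (acc : List Int) : List Int → List Int
  | [] => acc.reverse
  | v :: rest =>
    if v > 9 then
      match rest with
      | [] => solvecarryLoopA (PySem.Int.mod v 10 :: acc) [PySem.Int.floordiv v 10]
      | w :: rs => solvecarryLoopA (PySem.Int.mod v 10 :: acc) ((PySem.Int.floordiv v 10 + w) :: rs)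
    else solvecarryLoopA (v :: acc) rest
  termination_by l => (l.length, (l.headI).toNat)
  decreasing_by
    · refine Prod.Lex.right' _ (by simp) ?_
      have hd := PySem.Int.floordiv_eq_ediv_of_pos (a := v) (b := 10) (by omega)
      simp only [List.headI, hd]
      omega
    · exact Prod.Lex.left _ _ (by simp)
    · exact Prod.Lex.left _ _ (by simp)

def solvecarry (nums : List Int) : List Int := solvecarryLoopA [] nums

-- ===== PORT B =====
-- the trailing 'while carry > 0' of Source B
def solvecarryTailB (c : Int) : List Int :=
  if _h : c > 0 then PySem.Int.mod c 10 :: solvecarryTailB (PySem.Int.floordiv c 10)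
  else []
  termination_by c.toNat
  decreasing_by
    have hd := PySem.Int.floordiv_eq_ediv_of_pos (a := c) (b := 10) (by omega)
    simp only [hd]; omega

-- the 'for i in range(len(nums))' of Source B, with carry as explicit state
def solvecarryLoopB (c : Int) : List Int → List Int
  | [] => solvecarryTailB c
  | v :: rest =>
    let v' := v + c
    if v' > 9 then PySem.Int.mod v' 10 :: solvecarryLoopB (PySem.Int.floordiv v' 10) rest
    else v' :: solvecarryLoopB 0 rest

def solvecarry_alt (nums : List Int) : List Int := solvecarryLoopB 0 nums

-- ===== PRECONDITION & SPEC =====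
def Spec_solvecarry (nums : List Int) (out : List Int) : Prop := out = solvecarry_alt nums
instance (nums : List Int) (out : List Int) : Decidable (Spec_solvecarry nums out) := by unfold Spec_solvecarry; infer_instance

-- ===== CLAIM (what is proved, stated in full; the proofs are below) =====
def Claim_equal_solvecarry : Prop := ∀ (nums : List Int), Dom_solvecarry nums → Spec_solvecarry nums (solvecarry nums)

-- ===== LEMMAS AND PROOFS =====

-- state correspondence: B's state (carry c, suffix l) corresponds to A's suffix
-- '(head + c) :: tail' when l is nonempty, and to '[c]' (resp. []) when l = [] and c > 0 (resp. c = 0).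
def solvecarryMapState (c : Int) : List Int → List Int
  | [] => if c > 0 then [c] else []
  | v :: rest => (v + c) :: rest

theorem solvecarry_bridge (l : List Int) (c : Int) (acc : List Int) (hc : 0 ≤ c) :
    solvecarryLoopA acc (solvecarryMapState c l) = acc.reverse ++ solvecarryLoopB c l := by
  have hdiv : ∀ x : Int, PySem.Int.floordiv x 10 = x / 10 :=
    fun x => PySem.Int.floordiv_eq_ediv_of_pos (by omega)
  have hmod : ∀ x : Int, PySem.Int.mod x 10 = x % 10 :=
    fun x => PySem.Int.mod_eq_emod_of_pos (by omega)
  match l with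
  | [] =>
    by_cases h0 : c > 0
    · by_cases h9 : c > 9
      · have hrec := solvecarry_bridge [] (PySem.Int.floordiv c 10) (PySem.Int.mod c 10 :: acc)
          (by rw [hdiv]; omega)
        have hpos : PySem.Int.floordiv c 10 > 0 := by rw [hdiv]; omega
        simp only [solvecarryMapState, h0, if_true, hpos] at hrec ⊢
        rw [solvecarryLoopA.eq_def]
        simp only [h9, if_true]
        rw [hrec]
        conv_rhs => rw [solvecarryLoopB]
        rw [solvecarryTailB, dif_pos h0]
        simp [solvecarryLoopB]
      · simp only [solvecarryMapState, h0, if_true]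
        rw [solvecarryLoopA.eq_def]
        simp only [h9, if_false]
        rw [solvecarryLoopA]
        rw [solvecarryLoopB, solvecarryTailB, dif_pos h0, solvecarryTailB]
        have hz : ¬ PySem.Int.floordiv c 10 > 0 := by rw [hdiv]; omega
        rw [dif_neg hz, hmod]
        have : c % 10 = c := by omega
        simp [this]
    · have hc0 : c = 0 := by omega
      subst hc0
      simp [solvecarryMapState, solvecarryLoopA, solvecarryLoopB, solvecarryTailB]
  | v :: rest =>
    simp only [solvecarryMapState]
    by_cases h9 : v + c > 9
    · rw [solvecarryLoopA.eq_def]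
      simp only [h9, if_true]
      match rest with
      | [] =>
        show solvecarryLoopA (PySem.Int.mod (v + c) 10 :: acc) [PySem.Int.floordiv (v + c) 10]
          = acc.reverse ++ solvecarryLoopB c [v]
        have hpos : 0 ≤ PySem.Int.floordiv (v + c) 10 := by rw [hdiv]; omega
        have hrec := solvecarry_bridge [] (PySem.Int.floordiv (v + c) 10)
          (PySem.Int.mod (v + c) 10 :: acc) hpos
        have hpos' : PySem.Int.floordiv (v + c) 10 > 0 := by rw [hdiv]; omega
        simp only [solvecarryMapState, hpos', if_true] at hrec
        rw [hrec]
        conv_rhs => rw [solvecarryLoopB]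
        simp only [h9, if_true]
        simp [solvecarryLoopB]
      | w :: rs =>
        show solvecarryLoopA (PySem.Int.mod (v + c) 10 :: acc)
            ((PySem.Int.floordiv (v + c) 10 + w) :: rs) = acc.reverse ++ solvecarryLoopB c (v :: w :: rs)
        have hpos : 0 ≤ PySem.Int.floordiv (v + c) 10 := by rw [hdiv]; omega
        have hrec := solvecarry_bridge (w :: rs) (PySem.Int.floordiv (v + c) 10)
          (PySem.Int.mod (v + c) 10 :: acc) hpos
        simp only [solvecarryMapState] at hrec
        rw [show PySem.Int.floordiv (v+c) 10 + w = w + PySem.Int.floordiv (v+c) 10 by ring]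
        rw [hrec]
        conv_rhs => rw [solvecarryLoopB]
        simp [h9]
    · rw [solvecarryLoopA.eq_def]
      simp only [h9, if_false]
      have hrec := solvecarry_bridge rest 0 ((v + c) :: acc) (by omega)
      have hms : solvecarryMapState 0 rest = rest := by
        cases rest <;> simp [solvecarryMapState]
      rw [hms] at hrec
      rw [hrec]
      conv_rhs => rw [solvecarryLoopB]
      simp [h9]
  termination_by (l.length, c.toNat)
  decreasing_by
    · refine Prod.Lex.right' _ (by simp) ?_
      have hd := PySem.Int.floordiv_eq_ediv_of_pos (a := c) (b := 10) (by omega)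
      simp only [hd] at *
      omega
    · exact Prod.Lex.left _ _ (by simp)
    · exact Prod.Lex.left _ _ (by simp)
    · exact Prod.Lex.left _ _ (by simp)

-- ===== VERDICT (by name: the statement is the Claim_ definition above) =====
theorem solvecarry_spec : Claim_equal_solvecarry := by
  intro nums _
  unfold Spec_solvecarry solvecarry solvecarry_alt
  have h := solvecarry_bridge nums 0 [] (by omega)
  have hms : solvecarryMapState 0 nums = nums := by cases nums <;> simp [solvecarryMapState]
  rw [hms] at h
  simpa using h
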